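-- pv_equiv track=rewrite | github.com/zaddie29/News-aggregator-cli | News_aggregator_cli.py | filter_headlines
-- ===== SOURCE A (Python) =====
-- def filter_headlines(headlines, source=None, keyword=None, date=None):
--     filtered = headlines
--     if source:
--         filtered = [h for h in filtered if h['source'] == source]
--     if keyword:
--         filtered = [h for h in filtered if keyword.lower() in h['title'].lower()]
--     if date:
--         filtered = [h for h in filtered if h['publishedAt'][:10] == date]
--     return filtered
-- ===== SOURCE B (Python) =====
-- def filter_headlines(headlines, source=None, keyword=None, date=None):
--     if source:
--         buckets = {}
--         for h in headlines:
--             buckets.setdefault(h['source'], []).append(h)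
--         candidates = buckets.get(source, [])
--     else:
--         candidates = headlines
--     if not (keyword or date):
--         return candidates
--     kw = keyword.lower() if keyword else None
--     out = []
--     for h in candidates:
--         if kw is not None and kw not in h['title'].lower():
--             continue
--         if date and h['publishedAt'][:10] != date:
--             continue
--         out.append(h)
--     return out
-- ===== Notes on version B (the rewrite author's own statement) =====
-- stated objective: alternative
-- what changed: B replaces A's staged filter comprehensions with a dict index grouping headlines by source (one bucket lookup replaces the source scan) followed by an explicit accumulator loop with continue-style guards for keyword and date; equal order is preserved because grouping keeps each bucket in input order.
import Mathlib
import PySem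

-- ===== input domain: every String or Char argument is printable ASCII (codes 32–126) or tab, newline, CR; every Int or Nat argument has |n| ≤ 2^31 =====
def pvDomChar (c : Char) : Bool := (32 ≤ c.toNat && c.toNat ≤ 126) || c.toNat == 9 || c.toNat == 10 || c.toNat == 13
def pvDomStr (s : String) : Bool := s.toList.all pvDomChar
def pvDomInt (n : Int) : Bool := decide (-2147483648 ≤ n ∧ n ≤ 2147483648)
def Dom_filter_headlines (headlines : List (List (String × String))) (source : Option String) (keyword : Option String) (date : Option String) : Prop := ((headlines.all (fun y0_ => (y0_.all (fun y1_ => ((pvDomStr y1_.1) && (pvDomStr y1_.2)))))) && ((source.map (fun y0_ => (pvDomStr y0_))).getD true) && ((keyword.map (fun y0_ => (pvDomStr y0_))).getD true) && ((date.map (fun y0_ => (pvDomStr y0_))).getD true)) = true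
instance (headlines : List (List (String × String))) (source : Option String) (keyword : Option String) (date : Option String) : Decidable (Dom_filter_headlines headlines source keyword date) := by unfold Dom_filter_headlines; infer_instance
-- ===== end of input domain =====

-- B replaces A's staged filter comprehensions with a dict index grouped by source plus an
-- explicit accumulator loop for keyword/date (objective: alternative); proved equal to A on
-- Pre_ (inputs where Python A raises no KeyError).


-- Python truthiness of an Option String argument ('if source:')
def pvActive : Option String → Bool
  | none => false
  | some s => !(s == "")

-- ===== PORT A =====
def filter_headlines (headlines : List (List (String × String))) (source : Option String) (keyword : Option String) (date : Option String) : List (List (String × String)) :=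
  let filtered := headlines
  let filtered := if pvActive source then
      filtered.filter (fun h => PySem.Dict.getD ⟨h⟩ "source" "" == source.getD "")
    else filtered
  let filtered := if pvActive keyword then
      filtered.filter (fun h => PySem.Str.isIn (PySem.Str.lower (keyword.getD "")) (PySem.Str.lower (PySem.Dict.getD ⟨h⟩ "title" "")))
    else filtered
  let filtered := if pvActive date then
      filtered.filter (fun h => PySem.Str.slice (PySem.Dict.getD ⟨h⟩ "publishedAt" "") none (some 10) == date.getD "")
    else filtered
  filtered

-- ===== PORT B =====
-- buckets.setdefault(h['source'], []).append(h)  ≡  modify key [] (· ++ [h])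
def filter_headlines_alt (headlines : List (List (String × String))) (source : Option String) (keyword : Option String) (date : Option String) : List (List (String × String)) :=
  let candidates :=
    if pvActive source then
      (headlines.foldl
        (fun d h => PySem.Dict.modify d (PySem.Dict.getD ⟨h⟩ "source" "") [] (fun b => b ++ [h]))
        PySem.Dict.empty).getD (source.getD "") []
    else headlines
  if !pvActive keyword && !pvActive date then candidates
  else
    let kw : Option String := if pvActive keyword then some (PySem.Str.lower (keyword.getD "")) else none
    candidates.foldl (fun out h =>
      if (match kw with
          | some k => !PySem.Str.isIn k (PySem.Str.lower (PySem.Dict.getD ⟨h⟩ "title" ""))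
          | none => false) then out
      else if (pvActive date && !(PySem.Str.slice (PySem.Dict.getD ⟨h⟩ "publishedAt" "") none (some 10) == date.getD "")) then out
      else out ++ [h]) []

-- ===== PRECONDITION & SPEC =====
-- helpers for Pre_ (independent of the ports): key presence and the staged filter tests
def pvHasKey (h : List (String × String)) (k : String) : Bool := PySem.Dict.contains ⟨h⟩ k
def pvSrcPass (h : List (String × String)) (source : Option String) : Bool :=
  !pvActive source || PySem.Dict.getD ⟨h⟩ "source" "" == source.getD ""
def pvKwPass (h : List (String × String)) (keyword : Option String) : Bool :=
  !pvActive keyword || PySem.Str.isIn (PySem.Str.lower (keyword.getD "")) (PySem.Str.lower (PySem.Dict.getD ⟨h⟩ "title" ""))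
-- Pre_ excludes exactly the inputs where Python A raises KeyError: an active filter reaching
-- an item (i.e. the item survived the earlier active filters) whose dict lacks the needed key.
def Pre_filter_headlines (headlines : List (List (String × String))) (source : Option String) (keyword : Option String) (date : Option String) : Prop :=
  headlines.all (fun h =>
    (!pvActive source || pvHasKey h "source")
    && (!pvActive keyword || !pvSrcPass h source || pvHasKey h "title")
    && (!pvActive date || !(pvSrcPass h source && pvKwPass h keyword) || pvHasKey h "publishedAt")) = true
instance (headlines : List (List (String × String))) (source : Option String) (keyword : Option String) (date : Option String) : Decidable (Pre_filter_headlines headlines source keyword date) := by unfold Pre_filter_headlines; infer_instance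
def pvWitness_filter_headlines : (List (List (String × String))) × Option String × Option String × Option String :=
  ([[("source", "bbc"), ("title", "Hello World"), ("publishedAt", "2024-01-02T00:00")],
    [("source", "cnn"), ("title", "other"), ("publishedAt", "2024-01-03T00:00")]],
   some "bbc", some "HELLO", none)
def Spec_filter_headlines (headlines : List (List (String × String))) (source : Option String) (keyword : Option String) (date : Option String) (out : List (List (String × String))) : Prop := out = filter_headlines_alt headlines source keyword date
instance (headlines : List (List (String × String))) (source : Option String) (keyword : Option String) (date : Option String) (out : List (List (String × String))) : Decidable (Spec_filter_headlines headlines source keyword date out) := by unfold Spec_filter_headlines; infer_instance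

-- ===== CLAIM (what is proved, stated in full; the proofs are below) =====
def Claim_equal_filter_headlines : Prop := ∀ (headlines : List (List (String × String))) (source : Option String) (keyword : Option String) (date : Option String), Dom_filter_headlines headlines source keyword date → Pre_filter_headlines headlines source keyword date → Spec_filter_headlines headlines source keyword date (filter_headlines headlines source keyword date)

-- ===== LEMMAS AND PROOFS =====
-- the bucket index: looking up key s yields exactly the source-filtered sublist, in order
theorem pv_bucket (headlines : List (List (String × String))) (s : String) :
    (headlines.foldl
        (fun d h => PySem.Dict.modify d (PySem.Dict.getD ⟨h⟩ "source" "") [] (fun b => b ++ [h]))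
        PySem.Dict.empty).getD s []
      = headlines.filter (fun h => PySem.Dict.getD ⟨h⟩ "source" "" == s) := by
  have := PySem.Dict.getD_foldl_modify_append
      (headlines.map (fun h => (PySem.Dict.getD ⟨h⟩ "source" "", h))) PySem.Dict.empty s
  rw [List.foldl_map] at this
  simpa [List.filter_map, Function.comp_def] using this

-- the accumulator loop with continue-guards is a filter (two shapes, proved by induction)
theorem pv_loop1 {α : Type} (p : α → Prop) [DecidablePred p] (l acc : List α) :
    l.foldl (fun out h => if p h then out else out ++ [h]) acc
      = acc ++ l.filter (fun h => !decide (p h)) := by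
  induction l generalizing acc with
  | nil => simp
  | cons x xs ih => by_cases hx : p x <;> simp [hx, ih]

theorem pv_loop2 {α : Type} (p q : α → Prop) [DecidablePred p] [DecidablePred q] (l acc : List α) :
    l.foldl (fun out h => if p h then out else if q h then out ++ [h] else out) acc
      = acc ++ l.filter (fun h => !decide (p h) && decide (q h)) := by
  induction l generalizing acc with
  | nil => simp
  | cons x xs ih => by_cases hx : p x <;> by_cases hq : q x <;> simp [hx, hq, ih]

theorem pv_beq (a b : String) : (a == b) = decide (a = b) := by
  by_cases h : a = b <;> simp [h]

theorem pv_main (headlines : List (List (String × String))) (source : Option String) (keyword : Option String) (date : Option String) :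
    filter_headlines headlines source keyword date = filter_headlines_alt headlines source keyword date := by
  unfold filter_headlines filter_headlines_alt
  by_cases h1 : pvActive source <;> by_cases h2 : pvActive keyword <;> by_cases h3 : pvActive date <;>
    simp [h1, h2, h3, pv_bucket, pv_loop1, pv_loop2, PySem.List.foldl_append_ite_eq_filter, List.filter_filter, Bool.and_comm, Bool.and_assoc, pv_beq]

-- ===== VERDICT (by name: the statement is the Claim_ definition above) =====
theorem filter_headlines_spec : Claim_equal_filter_headlines := by
  intro headlines source keyword date _ _
  unfold Spec_filter_headlines
  exact pv_main headlines source keyword date
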